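-- pv_equiv track=rewrite | github.com/radoslawrolka/Introduction_to_Computer_Science_Course | zestaw_4/z12_d.py | zad12
-- ===== SOURCE A (Python) =====
-- import math
--
-- def is_prime(x):
--     if x < 2:
--         return False
--     for i in range(2, int(math.sqrt(x)) + 1):
--         if not x % i:
--             return False
--     return True
--
-- def is_composite(n):
--     if n == 1:
--         return False
--     else:
--         return not is_prime(n)
--
-- def condition(array, x, y, z):
--     count = 0
--     n = len(array)
--     for i, j in [(x + 1, y), (x - 1, y), (x, y - 1), (x, y + 1), (x + 1, y - 1), (x + 1, y + 1), (x - 1, y - 1),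
--                  (x - 1, y + 1)]:
--         if not array[z][i][j]:
--             count += 1
--     return count
--
-- def zad12(array_3d):
--     n = len(array_3d)
--     for i in range(n):  # zamiana liczb w arr_3d na True/False w zależności czy jest złożona
--         for j in range(n):
--             for k in range(n):
--                 array_3d[i][j][k] = is_composite(array_3d[i][j][k])
--
--     level_count = -1
--     for z in range(n):  #level
--         current_count = 0
--         for x in range(1, n - 1):   # liczymy bez brzegów, bo nie będzie tam 6 sąsiadów
--             for y in range(1, n - 1):
--                 neighbours = condition(array_3d, x, y, z)
--                 if neighbours >= 6:
--                     current_count += 1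
--         if level_count == -1:
--             level_count = current_count
--         else:
--             if level_count != current_count:
--                 return False
--     return True
-- ===== SOURCE B (Python) =====
-- import math
--
--
-- def is_composite(n):
--     if n == 1:
--         return False
--     return n < 2 or any(n % d == 0 for d in range(2, math.isqrt(n) + 1))
--
--
-- def zad12(array_3d):
--     # Note: like the original, this mutates array_3d in place into is_composite booleans.
--     n = len(array_3d)
--     for i in range(n):
--         for j in range(n):
--             for k in range(n):
--                 array_3d[i][j][k] = is_composite(array_3d[i][j][k])
--
--     counts = []
--     for z in range(n):
--         level = array_3d[z]
--         # indicator: 1 where the cell is NOT composite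
--         ind = [[0 if level[x][y] else 1 for y in range(n)] for x in range(n)]
--         # horizontal sliding-window sums of width 3, centred on interior columns
--         rowsum = [[ind[x][y - 1] + ind[x][y] + ind[x][y + 1] for y in range(1, n - 1)]
--                   for x in range(n)]
--         count = 0
--         for x in range(1, n - 1):
--             for y in range(1, n - 1):
--                 # 3x3 block sum minus the centre = non-composite neighbours
--                 if rowsum[x - 1][y - 1] + rowsum[x][y - 1] + rowsum[x + 1][y - 1] - ind[x][y] >= 6:
--                     count += 1
--         counts.append(count)
--     return all(c == counts[0] for c in counts)
-- ===== Notes on version B (the rewrite author's own statement) =====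
-- stated objective: alternative
-- what changed: Replaces A's per-cell scan over the 8 neighbour offsets by a precomputed horizontal width-3 sliding-window table per level (neighbour count = 3x3 block sum minus the centre) and replaces the -1-sentinel early-return loop by collecting the per-level counts and checking all(c == counts[0]); the in-place mutation of array_3d into is_composite booleans is kept.
import Mathlib
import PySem

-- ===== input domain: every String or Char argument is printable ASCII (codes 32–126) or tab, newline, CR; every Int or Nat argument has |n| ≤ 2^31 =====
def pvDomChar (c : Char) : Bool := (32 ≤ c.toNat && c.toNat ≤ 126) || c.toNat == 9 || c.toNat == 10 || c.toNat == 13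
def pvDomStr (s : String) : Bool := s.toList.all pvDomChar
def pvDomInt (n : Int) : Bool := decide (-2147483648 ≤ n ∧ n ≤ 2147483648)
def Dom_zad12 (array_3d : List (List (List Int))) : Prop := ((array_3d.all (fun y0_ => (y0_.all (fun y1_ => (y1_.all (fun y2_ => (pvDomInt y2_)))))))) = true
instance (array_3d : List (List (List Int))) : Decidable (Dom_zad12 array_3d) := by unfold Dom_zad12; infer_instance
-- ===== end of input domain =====

-- B replaces A's per-cell scan of the 8 neighbours by precomputed horizontal width-3 sliding-window
-- sums (3x3 block sum minus the centre) and compares the per-level counts with all(c == counts[0]);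
-- both Pythons mutate array_3d in place the same way, the equivalence proved is about the return value.

-- ===== PORT A =====

-- int(math.sqrt(x)) for 0 ≤ x: exact on the domain |x| ≤ 2^31 (math.sqrt is correctly rounded there)
def pvIsqrt (x : Int) : Int := (x.toNat.sqrt : Int)

-- the 'for i in range(...): if not x % i: return False' loop of is_prime
def pvPrimeLoop (x : Int) : List Int → Bool
  | [] => true
  | i :: rest => if PySem.Int.mod x i == 0 then false else pvPrimeLoop x rest

def pvIsPrime (x : Int) : Bool :=
  if x < 2 then false else pvPrimeLoop x (PySem.List.pyRange 2 (pvIsqrt x + 1) 1)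

def pvIsComposite (n : Int) : Bool := if n == 1 then false else !pvIsPrime n

-- array_3d[i][j][k]; the defaults are never hit on inputs satisfying Pre_zad12
def pvCell (a : List (List (List Int))) (i j k : Int) : Int :=
  PySem.List.pyGetD (PySem.List.pyGetD (PySem.List.pyGetD a i []) j []) k 0

-- array[z][i][j] on the mutated (boolean) array
def pvGetB (g : List (List (List Bool))) (z i j : Int) : Bool :=
  PySem.List.pyGetD (PySem.List.pyGetD (PySem.List.pyGetD g z []) i []) j false

-- condition(array, x, y, z)
def pvCondition (g : List (List (List Bool))) (x y z : Int) : Int :=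
  ([(x + 1, y), (x - 1, y), (x, y - 1), (x, y + 1), (x + 1, y - 1), (x + 1, y + 1),
    (x - 1, y - 1), (x - 1, y + 1)] : List (Int × Int)).foldl
    (fun count p => if !(pvGetB g z p.1 p.2) then count + 1 else count) 0

-- the current_count double loop of one level
def pvCount (g : List (List (List Bool))) (n z : Int) : Int :=
  (PySem.List.pyRange 1 (n - 1) 1).foldl (fun acc x =>
    (PySem.List.pyRange 1 (n - 1) 1).foldl (fun acc y =>
      if pvCondition g x y z ≥ 6 then acc + 1 else acc) acc) 0

-- the z loop with the level_count sentinel and the early 'return False'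
def pvLevels (g : List (List (List Bool))) (n : Int) : List Int → Int → Bool
  | [], _ => true
  | z :: rest, levelCount =>
    let current := pvCount g n z
    if levelCount == -1 then pvLevels g n rest current
    else if levelCount != current then false else pvLevels g n rest levelCount

def zad12 (array_3d : List (List (List Int))) : Bool :=
  let n : Int := array_3d.length
  -- the in-place mutation to is_composite booleans, as a pure grid
  let g : List (List (List Bool)) :=
    (PySem.List.pyRange 0 n 1).map (fun i =>
      (PySem.List.pyRange 0 n 1).map (fun j =>
        (PySem.List.pyRange 0 n 1).map (fun k => pvIsComposite (pvCell array_3d i j k))))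
  pvLevels g n (PySem.List.pyRange 0 n 1) (-1)

-- ===== PORT B =====

-- math.isqrt(n) is exactly Nat.sqrt on 0 ≤ n
def pvIsCompositeAlt (n : Int) : Bool :=
  if n == 1 then false
  else decide (n < 2) ||
    (PySem.List.pyRange 2 (pvIsqrt n + 1) 1).any (fun d => PySem.Int.mod n d == 0)

-- m[i][j] on an int table; defaults never hit at the indices used
def pvGetI (m : List (List Int)) (i j : Int) : Int :=
  PySem.List.pyGetD (PySem.List.pyGetD m i []) j 0

def zad12_alt (array_3d : List (List (List Int))) : Bool :=
  let n : Int := array_3d.length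
  -- the same in-place mutation as A, as a pure grid
  let g : List (List (List Bool)) :=
    (PySem.List.pyRange 0 n 1).map (fun i =>
      (PySem.List.pyRange 0 n 1).map (fun j =>
        (PySem.List.pyRange 0 n 1).map (fun k => pvIsCompositeAlt (pvCell array_3d i j k))))
  let counts : List Int :=
    (PySem.List.pyRange 0 n 1).map (fun z =>
      let level := PySem.List.pyGetD g z []
      let ind : List (List Int) :=
        (PySem.List.pyRange 0 n 1).map (fun x =>
          (PySem.List.pyRange 0 n 1).map (fun y =>
            if PySem.List.pyGetD (PySem.List.pyGetD level x []) y false then (0 : Int) else 1))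
      let rowsum : List (List Int) :=
        (PySem.List.pyRange 0 n 1).map (fun x =>
          (PySem.List.pyRange 1 (n - 1) 1).map (fun y =>
            pvGetI ind x (y - 1) + pvGetI ind x y + pvGetI ind x (y + 1)))
      (PySem.List.pyRange 1 (n - 1) 1).foldl (fun acc x =>
        (PySem.List.pyRange 1 (n - 1) 1).foldl (fun acc y =>
          if pvGetI rowsum (x - 1) (y - 1) + pvGetI rowsum x (y - 1) + pvGetI rowsum (x + 1) (y - 1)
              - pvGetI ind x y ≥ 6 then acc + 1 else acc) acc) 0)
  counts.all (fun c => c == PySem.List.pyGetD counts 0 0)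

-- ===== PRECONDITION & SPEC =====
-- Pre_ excludes exactly the ragged inputs on which the Python A raises IndexError: each of the
-- first n = len(array_3d) levels must have ≥ n rows and each of its first n rows ≥ n columns.
def Pre_zad12 (array_3d : List (List (List Int))) : Prop :=
  ∀ lvl ∈ array_3d, array_3d.length ≤ lvl.length ∧
    ∀ j ∈ List.range array_3d.length, array_3d.length ≤ (lvl.getD j []).length
instance (array_3d : List (List (List Int))) : Decidable (Pre_zad12 array_3d) := by
  unfold Pre_zad12; infer_instance

def pvWitness_zad12 : List (List (List Int)) :=
  [[[4, 5, 6], [7, 8, 9], [10, 11, 12]],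
   [[2, 3, 4], [5, 6, 7], [8, 9, 10]],
   [[1, 4, 9], [16, 25, 36], [49, 64, 81]]]

def Spec_zad12 (array_3d : List (List (List Int))) (out : Bool) : Prop := out = zad12_alt array_3d
instance (array_3d : List (List (List Int))) (out : Bool) : Decidable (Spec_zad12 array_3d out) := by
  unfold Spec_zad12; infer_instance

-- ===== CLAIM (what is proved, stated in full; the proofs are below) =====
def Claim_equal_zad12 : Prop := ∀ (array_3d : List (List (List Int))), Dom_zad12 array_3d → Pre_zad12 array_3d → Spec_zad12 array_3d (zad12 array_3d)

-- ===== LEMMAS AND PROOFS =====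

-- A's negated prime loop is an existence test for a divisor
theorem pvPrimeLoop_any (x : Int) (l : List Int) :
    (!pvPrimeLoop x l) = l.any (fun i => PySem.Int.mod x i == 0) := by
  induction l with
  | nil => rfl
  | cons i rest ih =>
    simp only [pvPrimeLoop, List.any_cons]
    by_cases h : PySem.Int.mod x i == 0 <;> simp [h, ih]

-- the two composite tests agree
theorem pvIsComposite_eq : pvIsComposite = pvIsCompositeAlt := by
  funext n
  simp only [pvIsComposite, pvIsCompositeAlt, pvIsPrime]
  by_cases h1 : n == 1
  · simp [h1]
  · by_cases h2 : n < 2 <;> simp [h1, h2, pvPrimeLoop_any]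

-- indexing a comprehension over range(a, b)
theorem pvGetD_map_pyRange' {β : Type} (a b : Int) (f : Int → β) (i : Int) (d : β)
    (h0 : 0 ≤ i - a) (h1 : i < b) :
    PySem.List.pyGetD ((PySem.List.pyRange a b 1).map f) (i - a) d = f i := by
  have hlen : i - a < (((PySem.List.pyRange a b 1).map f).length : Int) := by
    simp [PySem.List.length_pyRange_one]; omega
  rw [PySem.List.pyGetD_eq_getElem _ _ h0 hlen]
  have hk : (i - a).toNat < (PySem.List.pyRange a b 1).length := by
    simp [PySem.List.length_pyRange_one]; omega
  simp only [List.getElem_map]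
  rw [PySem.List.getElem_pyRange_one a b _ hk]
  congr 1
  omega

-- a fold that only ever keeps or increments its accumulator never goes below it
theorem pvFoldl_ge {α : Type} (l : List α) (f : Int → α → Int)
    (hf : ∀ a x, a ≤ f a x) (init : Int) : init ≤ l.foldl f init := by
  induction l generalizing init with
  | nil => exact le_refl _
  | cons x rest ih => exact le_trans (hf init x) (ih (f init x))

theorem pvCount_nonneg (g : List (List (List Bool))) (n z : Int) : 0 ≤ pvCount g n z := by
  unfold pvCount
  apply pvFoldl_ge
  intro a x
  apply pvFoldl_ge
  intro a y
  split <;> omega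

-- if !b then c+1 else c, as c + indicator
theorem pvIndStep (b : Bool) (c : Int) :
    (if !b then c + 1 else c) = c + (if b then (0 : Int) else 1) := by
  cases b <;> simp

-- B's indicator and sliding-window tables of one level, as named terms (zeta-expansions of
-- the lets in zad12_alt's body; used only by the proofs)
def pvIndT (g : List (List (List Bool))) (n z : Int) : List (List Int) :=
  (PySem.List.pyRange 0 n 1).map (fun x =>
    (PySem.List.pyRange 0 n 1).map (fun y =>
      if PySem.List.pyGetD (PySem.List.pyGetD (PySem.List.pyGetD g z []) x []) y false
      then (0 : Int) else 1))

def pvRowsumT (g : List (List (List Bool))) (n z : Int) : List (List Int) :=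
  (PySem.List.pyRange 0 n 1).map (fun x =>
    (PySem.List.pyRange 1 (n - 1) 1).map (fun y =>
      pvGetI (pvIndT g n z) x (y - 1) + pvGetI (pvIndT g n z) x y + pvGetI (pvIndT g n z) x (y + 1)))

-- B's per-level count, as a named term
def pvCountB (g : List (List (List Bool))) (n z : Int) : Int :=
  (PySem.List.pyRange 1 (n - 1) 1).foldl (fun acc x =>
    (PySem.List.pyRange 1 (n - 1) 1).foldl (fun acc y =>
      if pvGetI (pvRowsumT g n z) (x - 1) (y - 1) + pvGetI (pvRowsumT g n z) x (y - 1)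
          + pvGetI (pvRowsumT g n z) (x + 1) (y - 1) - pvGetI (pvIndT g n z) x y ≥ 6
      then acc + 1 else acc) acc) 0

-- value of an entry of the indicator table
theorem pvIndVal (g : List (List (List Bool))) (n z u v : Int)
    (h1 : 0 ≤ u) (h2 : u < n) (h3 : 0 ≤ v) (h4 : v < n) :
    pvGetI (pvIndT g n z) u v
    = if PySem.List.pyGetD (PySem.List.pyGetD (PySem.List.pyGetD g z []) u []) v false
      then (0 : Int) else 1 := by
  unfold pvIndT pvGetI
  rw [PySem.List.pyGetD_map_pyRange_of_nonneg _ n u [] h1 h2]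
  rw [PySem.List.pyGetD_map_pyRange_of_nonneg _ n v 0 h3 h4]

-- value of an entry of the sliding-window table
theorem pvRowsumVal (g : List (List (List Bool))) (n z u v : Int)
    (h1 : 0 ≤ u) (h2 : u < n) (h3 : 0 ≤ v - 1) (h4 : v < n - 1) :
    pvGetI (pvRowsumT g n z) u (v - 1)
    = pvGetI (pvIndT g n z) u (v - 1) + pvGetI (pvIndT g n z) u v + pvGetI (pvIndT g n z) u (v + 1) := by
  conv_lhs => unfold pvRowsumT pvGetI
  rw [PySem.List.pyGetD_map_pyRange_of_nonneg _ n u [] h1 h2]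
  rw [pvGetD_map_pyRange' 1 (n - 1) _ v 0 h3 h4]
  rfl

-- the heart: A's 8-neighbour count equals B's 3x3-window expression, per interior cell
theorem pvCondition_eq (g : List (List (List Bool))) (n x y z : Int)
    (hx1 : 1 ≤ x) (hx2 : x < n - 1) (hy1 : 1 ≤ y) (hy2 : y < n - 1) :
    pvCondition g x y z =
      pvGetI (pvRowsumT g n z) (x - 1) (y - 1) + pvGetI (pvRowsumT g n z) x (y - 1)
        + pvGetI (pvRowsumT g n z) (x + 1) (y - 1) - pvGetI (pvIndT g n z) x y := by
  rw [pvRowsumVal g n z (x - 1) y (by omega) (by omega) (by omega) (by omega)]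
  rw [pvRowsumVal g n z x y (by omega) (by omega) (by omega) (by omega)]
  rw [pvRowsumVal g n z (x + 1) y (by omega) (by omega) (by omega) (by omega)]
  rw [pvIndVal g n z (x - 1) (y - 1) (by omega) (by omega) (by omega) (by omega)]
  rw [pvIndVal g n z (x - 1) y (by omega) (by omega) (by omega) (by omega)]
  rw [pvIndVal g n z (x - 1) (y + 1) (by omega) (by omega) (by omega) (by omega)]
  rw [pvIndVal g n z x (y - 1) (by omega) (by omega) (by omega) (by omega)]
  rw [pvIndVal g n z x y (by omega) (by omega) (by omega) (by omega)]
  rw [pvIndVal g n z x (y + 1) (by omega) (by omega) (by omega) (by omega)]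
  rw [pvIndVal g n z (x + 1) (y - 1) (by omega) (by omega) (by omega) (by omega)]
  rw [pvIndVal g n z (x + 1) y (by omega) (by omega) (by omega) (by omega)]
  rw [pvIndVal g n z (x + 1) (y + 1) (by omega) (by omega) (by omega) (by omega)]
  unfold pvCondition pvGetB
  simp only [List.foldl_cons, List.foldl_nil]
  simp only [pvIndStep]
  ring

-- B's per-level body equals A's per-level count
theorem pvCount_eq (g : List (List (List Bool))) (n z : Int) :
    pvCount g n z = pvCountB g n z := by
  unfold pvCount pvCountB
  apply PySem.List.foldl_congr_mem
  intro acc x hx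
  apply PySem.List.foldl_congr_mem
  intro acc y hy
  rw [PySem.List.mem_pyRange_one] at hx hy
  rw [pvCondition_eq g n x y z hx.1 hx.2 hy.1 hy.2]

-- the sentinel loop with a nonnegative seed is an 'all equal to the seed' test
theorem pvLevels_aux (g : List (List (List Bool))) (n : Int) (zs : List Int) (c : Int)
    (hc : 0 ≤ c) : pvLevels g n zs c = zs.all (fun z => pvCount g n z == c) := by
  induction zs with
  | nil => rfl
  | cons z rest ih =>
    simp only [pvLevels, List.all_cons]
    have hne : (c == -1) = false := by simp; omega
    rw [hne]
    simp only [Bool.false_eq_true, if_false]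
    by_cases h : pvCount g n z = c
    · simp [h, bne, ih]
    · have hb : (c != pvCount g n z) = true := by
        simp [bne]; exact fun hh => h hh.symm
      rw [hb]
      simp [beq_iff_eq, h]

theorem pvMain (g : List (List (List Bool))) (n : Int) (R : List Int) (f : Int → Int)
    (hf : ∀ z, f z = pvCount g n z) :
    pvLevels g n R (-1) = (R.map f).all (fun c => c == PySem.List.pyGetD (R.map f) 0 0) := by
  have hm : R.map f = R.map (pvCount g n) := List.map_congr_left (fun z _ => hf z)
  rw [hm]
  cases R with
  | nil => rfl
  | cons z rest =>
    simp only [pvLevels, List.map_cons, PySem.List.pyGetD_zero_cons, List.all_cons]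
    rw [if_pos (by decide : ((-1 : Int) == -1) = true)]
    rw [pvLevels_aux g n rest (pvCount g n z) (pvCount_nonneg g n z)]
    simp [List.all_map, Function.comp_def]

theorem zad12_eq (array_3d : List (List (List Int))) : zad12 array_3d = zad12_alt array_3d := by
  simp only [zad12, zad12_alt, pvIsComposite_eq]
  exact pvMain _ _ _ _ (fun z => (pvCount_eq _ _ z).symm)

-- ===== VERDICT (by name: the statement is the Claim_ definition above) =====
theorem zad12_spec : Claim_equal_zad12 := by
  intro a _ _
  unfold Spec_zad12
  exact zad12_eq a
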